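-- pv_equiv track=rewrite | github.com/TheRealJerry/Doudizhu | straights.py | check_4_card
-- ===== SOURCE A (Python) =====
-- def check_4_card(curr_lst, prev_lst):
--     if curr_lst is []:
--         return False
--
--     def helper(lst):
--         if len(lst) != 6:
--             if len(lst) != 8:
--                 return False
--
--         char_lst = []
--         ele_counter = []
--         for ele in lst:
--             if [ele, lst.count(ele)] not in char_lst:
--                 char_lst.append([ele, lst.count(ele)])
--                 ele_counter.append(lst.count(ele))
--         if len(char_lst) != 2:
--             if len(char_lst) != 3:
--                 return False
--         # feiji check
--         if ele_counter.count(4) != 1: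
--             if ele_counter.count(4) != 2:
--                 return False
--         if len(lst) == 6:
--             if ele_counter.count(1) != 2:
--                 if ele_counter.count(2) != 1 or len(char_lst) != 2:
--                     return False
--         if len(lst) == 8:
--             if ele_counter.count(2) != 2:
--                 if ele_counter.count(4) != 2 or len(char_lst) != 2:
--                     return False
--         final = []
--         for ele in char_lst:
--             if ele[1] == 4:
--                 final.append(ele[0])
--         return True, int(min(final))
--
--     if helper(curr_lst) is False:
--         return False
--     elif prev_lst == []:
--         return True
--     elif helper(prev_lst) is False:
--         return False
--     elif len(curr_lst) != len(prev_lst):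
--         return False
--     return helper(curr_lst)[1] > helper(prev_lst)[1]
-- ===== SOURCE B (Python) =====
-- def check_4_card(curr_lst, prev_lst):
--     def quad_value(lst):
--         # sort; scan for an exact run of four equal cards; None if the play is not a
--         # valid four-card (feiji) play, else the smallest rank held four times
--         n = len(lst)
--         if n != 6 and n != 8:
--             return None
--         s = sorted(lst)
--         for i in range(n - 3):
--             if s[i] == s[i + 3] and (i == 0 or s[i - 1] != s[i]) and (i + 4 == n or s[i + 4] != s[i]):
--                 if n == 8:
--                     r = s[:i] + s[i + 4:]
--                     if r[0] != r[1] or r[2] != r[3]: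
--                         return None
--                 return s[i]
--         return None
--
--     curr = quad_value(curr_lst)
--     if curr is None:
--         return False
--     if prev_lst == []:
--         return True
--     prev = quad_value(prev_lst)
--     if prev is None or len(curr_lst) != len(prev_lst):
--         return False
--     return curr > prev
-- ===== Notes on version B (the rewrite author's own statement) =====
-- stated objective: alternative
-- what changed: B sorts the hand once and scans the sorted list positionally for an exact run of four equal cards (checking run boundaries and, for 8-card plays, that the four leftover cards form two adjacent pairs), instead of A's repeated list.count scans building a count table and testing count signatures; the outer comparison logic is kept.
import Mathlib
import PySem

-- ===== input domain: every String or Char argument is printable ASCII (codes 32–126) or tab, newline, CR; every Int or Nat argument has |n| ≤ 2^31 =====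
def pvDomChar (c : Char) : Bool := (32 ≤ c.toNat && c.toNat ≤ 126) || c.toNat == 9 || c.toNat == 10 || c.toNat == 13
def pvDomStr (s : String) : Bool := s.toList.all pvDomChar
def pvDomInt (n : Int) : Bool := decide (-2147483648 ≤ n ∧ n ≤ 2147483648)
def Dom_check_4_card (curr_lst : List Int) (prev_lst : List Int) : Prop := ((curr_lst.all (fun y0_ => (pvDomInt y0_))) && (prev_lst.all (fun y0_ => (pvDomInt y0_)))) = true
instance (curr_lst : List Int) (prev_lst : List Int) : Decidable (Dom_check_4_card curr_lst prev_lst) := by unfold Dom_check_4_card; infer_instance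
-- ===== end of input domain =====

-- B sorts the hand once and scans the sorted list positionally for an exact run of four
-- equal cards (with a two-adjacent-pairs check on the 8-card leftovers), instead of A's
-- repeated list.count scans and count-signature conditionals (objective: alternative).


-- ===== PORT A =====
-- Python's helper returns False or (True, int(min(final))); ported as Option Int
-- (none = False, some m = (True, m)).  min(final) is PySem.List.min? (final is
-- never empty when reached, so the Option collapses nothing on reachable paths).
def check_4_card_helper (lst : List Int) : Option Int :=
  if lst.length ≠ 6 ∧ lst.length ≠ 8 then none
  else
    -- for ele in lst: append ([ele, lst.count(ele)]) to char_lst / its count to ele_counter when new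
    let st := lst.foldl (fun (st : List (Int × Int) × List Int) ele =>
      if (ele, (PySem.List.count lst ele : Int)) ∈ st.1 then st
      else (st.1 ++ [(ele, (PySem.List.count lst ele : Int))],
            st.2 ++ [(PySem.List.count lst ele : Int)])) ([], [])
    let char_lst := st.1
    let ele_counter := st.2
    if char_lst.length ≠ 2 ∧ char_lst.length ≠ 3 then none
    else if PySem.List.count ele_counter 4 ≠ 1 ∧ PySem.List.count ele_counter 4 ≠ 2 then none
    else if lst.length = 6 ∧ (PySem.List.count ele_counter 1 ≠ 2 ∧
              (PySem.List.count ele_counter 2 ≠ 1 ∨ char_lst.length ≠ 2)) then none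
    else if lst.length = 8 ∧ (PySem.List.count ele_counter 2 ≠ 2 ∧
              (PySem.List.count ele_counter 4 ≠ 2 ∨ char_lst.length ≠ 2)) then none
    else
      let final := char_lst.foldl (fun acc e => if e.2 = 4 then acc ++ [e.1] else acc) []
      PySem.List.min? final (fun x => x)

def check_4_card (curr_lst : List Int) (prev_lst : List Int) : Bool :=
  -- `if curr_lst is []` is an identity test on a fresh literal: always False, falls through
  match check_4_card_helper curr_lst with
  | none => false                                     -- helper(curr_lst) is False
  | some a =>
    if prev_lst = [] then true
    else match check_4_card_helper prev_lst with
      | none => false                                 -- helper(prev_lst) is False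
      | some b =>
        if curr_lst.length ≠ prev_lst.length then false
        -- helper(curr_lst)[1] > helper(prev_lst)[1]: Python recomputes the same values a, b
        else decide (a > b)

-- ===== PORT B =====
-- the `for i in range(n - 3)` loop of B's quad_value; every index accessed is provably in
-- range 0..n-1 (i < n-3, i-1 only read when i > 0, i+4 only when i+4 < n), so pyGetD is
-- exact for Python's s[·] here
def check_4_card_scan (s : List Int) (n : Nat) : Nat → Nat → Option Int
  | 0, _ => none                                      -- loop exhausted: fall through to `return None`
  | fuel + 1, i =>                                    -- fuel counts the remaining iterations of `range(n-3)`
    if PySem.List.pyGetD s (i : Int) 0 = PySem.List.pyGetD s ((i : Int) + 3) 0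
        ∧ (i = 0 ∨ PySem.List.pyGetD s ((i : Int) - 1) 0 ≠ PySem.List.pyGetD s (i : Int) 0)
        ∧ (i + 4 = n ∨ PySem.List.pyGetD s ((i : Int) + 4) 0 ≠ PySem.List.pyGetD s (i : Int) 0) then
      if n = 8 then
        -- r = s[:i] + s[i+4:]
        let r := PySem.List.slice s none (some (i : Int)) ++ PySem.List.slice s (some ((i : Int) + 4)) none
        if PySem.List.pyGetD r 0 0 ≠ PySem.List.pyGetD r 1 0 ∨ PySem.List.pyGetD r 2 0 ≠ PySem.List.pyGetD r 3 0 then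
          none
        else some (PySem.List.pyGetD s (i : Int) 0)
      else some (PySem.List.pyGetD s (i : Int) 0)
    else check_4_card_scan s n fuel (i + 1)

-- B's quad_value: None = not a valid four-card play, some v = smallest rank held four times
def check_4_card_quad (lst : List Int) : Option Int :=
  if lst.length ≠ 6 ∧ lst.length ≠ 8 then none
  else check_4_card_scan (PySem.List.sorted lst (fun x => x) false) lst.length (lst.length - 3) 0

def check_4_card_alt (curr_lst : List Int) (prev_lst : List Int) : Bool :=
  match check_4_card_quad curr_lst with
  | none => false                                     -- curr is None
  | some curr =>
    if prev_lst = [] then true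
    else match check_4_card_quad prev_lst with
      | none => false                                 -- prev is None or …
      | some prev =>
        if curr_lst.length ≠ prev_lst.length then false
        else decide (curr > prev)

-- ===== PRECONDITION & SPEC =====
def Spec_check_4_card (curr_lst : List Int) (prev_lst : List Int) (out : Bool) : Prop := out = check_4_card_alt curr_lst prev_lst
instance (curr_lst : List Int) (prev_lst : List Int) (out : Bool) : Decidable (Spec_check_4_card curr_lst prev_lst out) := by unfold Spec_check_4_card; infer_instance

-- ===== CLAIM (what is proved, stated in full; the proofs are below) =====
def Claim_equal_check_4_card : Prop := ∀ (curr_lst : List Int) (prev_lst : List Int), Dom_check_4_card curr_lst prev_lst → Spec_check_4_card curr_lst prev_lst (check_4_card curr_lst prev_lst)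

-- ===== LEMMAS AND PROOFS =====

-- counts of two distinct values never exceed the length
theorem pv_count_two_le {a b : Int} (h : a ≠ b) (cs : List Int) :
    cs.count a + cs.count b ≤ cs.length := by
  induction cs with
  | nil => simp
  | cons y t ih =>
    simp only [List.count_cons, List.length_cons, beq_iff_eq]
    split_ifs <;> omega

-- a list whose elements are all a or b has count a + count b = length
theorem pv_two_val_full {a b : Int} (h : a ≠ b) (ys : List Int)
    (hys : ∀ y ∈ ys, y = a ∨ y = b) : ys.count a + ys.count b = ys.length := by
  induction ys with
  | nil => simp
  | cons y t ih =>
    have ht := ih (fun z hz => hys z (List.mem_cons_of_mem _ hz))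
    have hy := hys y List.mem_cons_self
    simp only [List.count_cons, List.length_cons, beq_iff_eq]
    rcases hy with hy | hy <;> split_ifs <;> omega

-- if two distinct values already account for the whole length, everything is one of them
theorem pv_all_of_count_two {a b : Int} (h : a ≠ b) (cs : List Int)
    (hs : cs.count a + cs.count b = cs.length) : ∀ x ∈ cs, x = a ∨ x = b := by
  induction cs with
  | nil => simp
  | cons y t ih =>
    intro x hx
    have hle := pv_count_two_le h t
    simp only [List.count_cons, List.length_cons, beq_iff_eq] at hs
    rcases List.mem_cons.mp hx with rfl | hx'
    · split_ifs at hs with h1 h2 h2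
      · exact Or.inl h1
      · exact Or.inl h1
      · exact Or.inr h2
      · exfalso; omega
    · split_ifs at hs with h1 h2 h2
      · exact absurd (h1.symm.trans h2) h
      · exact ih (by omega) x hx'
      · exact ih (by omega) x hx'
      · exfalso; omega

-- permutation with a two-valued target from count facts
theorem pv_perm_of_counts {a b : Int} (h : a ≠ b) (cs ys : List Int)
    (hys : ∀ y ∈ ys, y = a ∨ y = b)
    (ha : cs.count a = ys.count a) (hb : cs.count b = ys.count b)
    (hl : cs.length = ys.length) : cs.Perm ys := by
  rw [List.perm_iff_count]
  intro x
  by_cases hxa : x = a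
  · subst hxa; exact ha
  by_cases hxb : x = b
  · subst hxb; exact hb
  have hy0 : ys.count x = 0 := by
    rw [List.count_eq_zero]
    intro hmem
    rcases hys x hmem with rfl | rfl
    · exact hxa rfl
    · exact hxb rfl
  have hysfull := pv_two_val_full h ys hys
  have hall : ∀ z ∈ cs, z = a ∨ z = b :=
    pv_all_of_count_two h cs (by omega)
  rw [hy0, List.count_eq_zero]
  intro hmem
  rcases hall x hmem with rfl | rfl
  · exact hxa rfl
  · exact hxb rfl

-- the legal 6-card feiji shapes: A's count conditions pin the multiset {1,1,4} or {2,4}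
theorem pv_cond6 (cs : List Int)
    (h2 : cs.length = 2 ∨ cs.length = 3)
    (h4 : cs.count 4 = 1 ∨ cs.count 4 = 2)
    (h16 : cs.count 1 = 2 ∨ (cs.count 2 = 1 ∧ cs.length = 2)) :
    cs.Perm [1, 1, 4] ∨ cs.Perm [2, 4] := by
  rcases h16 with h1 | ⟨h2c, hl2⟩
  · have hle := pv_count_two_le (by norm_num : (1 : Int) ≠ 4) cs
    rcases h2 with hl | hl
    · exfalso; rcases h4 with h4 | h4 <;> omega
    · have h41 : cs.count 4 = 1 := by rcases h4 with h4 | h4 <;> omega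
      exact Or.inl (pv_perm_of_counts (a := 1) (b := 4) (by norm_num) cs [1, 1, 4] (by decide)
        (by rw [h1]; decide) (by rw [h41]; decide) (by rw [hl]; decide))
  · have hle := pv_count_two_le (by norm_num : (2 : Int) ≠ 4) cs
    have h41 : cs.count 4 = 1 := by rcases h4 with h4 | h4 <;> omega
    exact Or.inr (pv_perm_of_counts (a := 2) (b := 4) (by norm_num) cs [2, 4] (by decide)
      (by rw [h2c]; decide) (by rw [h41]; decide) (by rw [hl2]; decide))

-- the legal 8-card feiji shapes: {4,4} or {2,2,4}
theorem pv_cond8 (cs : List Int)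
    (h2 : cs.length = 2 ∨ cs.length = 3)
    (h4 : cs.count 4 = 1 ∨ cs.count 4 = 2)
    (h28 : cs.count 2 = 2 ∨ (cs.count 4 = 2 ∧ cs.length = 2)) :
    cs.Perm [4, 4] ∨ cs.Perm [2, 2, 4] := by
  rcases h28 with h2c | ⟨h42, hl2⟩
  · have hle := pv_count_two_le (by norm_num : (2 : Int) ≠ 4) cs
    rcases h2 with hl | hl
    · exfalso; rcases h4 with h4 | h4 <;> omega
    · have h41 : cs.count 4 = 1 := by rcases h4 with h4 | h4 <;> omega
      exact Or.inr (pv_perm_of_counts (a := 2) (b := 4) (by norm_num) cs [2, 2, 4] (by decide)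
        (by rw [h2c]; decide) (by rw [h41]; decide) (by rw [hl]; decide))
  · left
    rw [List.perm_iff_count]
    intro x
    by_cases hx : x = 4
    · subst hx; rw [h42]; decide
    · have hall := List.count_eq_length.mp (h42.trans hl2.symm)
      have hnm : x ∉ cs := fun hm => hx ((hall x hm).symm)
      rw [List.count_eq_zero.mpr hnm]
      exact (List.count_eq_zero.mpr (by simp [hx])).symm

-- the canonical middle form both helpers reduce to (proof-side only)
def pvPairs (lst : List Int) : List (Int × Int) :=
  (PySem.Set.ofList lst).map (fun k => (k, (PySem.List.count lst k : Int)))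

def pvCs (lst : List Int) : List Int := (pvPairs lst).map (fun p => p.2)

abbrev pvCond (lst : List Int) : Prop :=
  (lst.length = 6 ∧ ((pvCs lst).Perm [1, 1, 4] ∨ (pvCs lst).Perm [2, 4])) ∨
  (lst.length = 8 ∧ ((pvCs lst).Perm [4, 4] ∨ (pvCs lst).Perm [2, 2, 4]))


def pvCanon (lst : List Int) : Option Int :=
  if pvCond lst then
    PySem.List.min? (((pvPairs lst).filter (fun p => p.2 = 4)).map (fun p => p.1)) (fun x => x)
  else none

-- A's pair-building loop is the dedup-set map
theorem pv_fold_A (lst : List Int) (l : List Int) (s : List Int) :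
    l.foldl (fun (st : List (Int × Int) × List Int) ele =>
      if (ele, (PySem.List.count lst ele : Int)) ∈ st.1 then st
      else (st.1 ++ [(ele, (PySem.List.count lst ele : Int))],
            st.2 ++ [(PySem.List.count lst ele : Int)]))
      (s.map (fun k => (k, (PySem.List.count lst k : Int))),
       s.map (fun k => (PySem.List.count lst k : Int)))
    = ((l.foldl PySem.Set.add s).map (fun k => (k, (PySem.List.count lst k : Int))),
       (l.foldl PySem.Set.add s).map (fun k => (PySem.List.count lst k : Int))) := by
  induction l generalizing s with
  | nil => rfl
  | cons x l ih =>
    simp only [List.foldl_cons]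
    have hmem : ((x, (PySem.List.count lst x : Int)) ∈
        s.map (fun k => (k, (PySem.List.count lst k : Int)))) ↔ x ∈ s := by
      simp only [List.mem_map, Prod.mk.injEq]
      constructor
      · rintro ⟨k, hk, rfl, -⟩; exact hk
      · intro hk; exact ⟨x, hk, rfl, rfl⟩
    rw [PySem.Set.add_eq_ite]
    by_cases hx : x ∈ s
    · rw [if_pos (hmem.mpr hx), if_pos hx]
      exact ih s
    · rw [if_neg (fun hm => hx (hmem.mp hm)), if_neg hx]
      have := ih (s ++ [x])
      simpa [List.map_append] using this

-- the final-building loop is filter-then-map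
theorem pv_final_eq (P : List (Int × Int)) :
    P.foldl (fun acc e => if e.2 = 4 then acc ++ [e.1] else acc) []
      = (P.filter (fun p => p.2 = 4)).map (fun p => p.1) := by
  have h := PySem.List.foldl_append_if (fun e : Int × Int => decide (e.2 = 4)) (fun e => e.1) P []
  simpa [decide_eq_true_eq] using h

-- A's acceptance chain, characterised by pvCond
theorem pv_accept_iff (lst : List Int) :
    pvCond lst ↔
      ¬(lst.length ≠ 6 ∧ lst.length ≠ 8) ∧
      ¬((pvCs lst).length ≠ 2 ∧ (pvCs lst).length ≠ 3) ∧
      ¬((pvCs lst).count 4 ≠ 1 ∧ (pvCs lst).count 4 ≠ 2) ∧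
      ¬(lst.length = 6 ∧ ((pvCs lst).count 1 ≠ 2 ∧
          ((pvCs lst).count 2 ≠ 1 ∨ (pvCs lst).length ≠ 2))) ∧
      ¬(lst.length = 8 ∧ ((pvCs lst).count 2 ≠ 2 ∧
          ((pvCs lst).count 4 ≠ 2 ∨ (pvCs lst).length ≠ 2))) := by
  constructor
  · rintro (⟨h6, hp | hp⟩ | ⟨h8, hp | hp⟩) <;>
      have hlen := hp.length_eq <;>
      have hc1 := hp.count_eq 1 <;>
      have hc2 := hp.count_eq 2 <;>
      have hc4 := hp.count_eq 4 <;>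
      simp only [List.count_cons, List.count_nil, List.length_cons, List.length_nil] at hlen hc1 hc2 hc4 <;>
      norm_num at hc1 hc2 hc4 <;>
      refine ⟨by omega, by omega, by omega, by omega, by omega⟩
  · rintro ⟨c1, c2, c3, c4, c5⟩
    by_cases h6 : lst.length = 6
    · exact Or.inl ⟨h6, pv_cond6 _ (by omega) (by omega) (by omega)⟩
    · have h8 : lst.length = 8 := by omega
      exact Or.inr ⟨h8, pv_cond8 _ (by omega) (by omega) (by omega)⟩

theorem pv_helperA_eq (lst : List Int) : check_4_card_helper lst = pvCanon lst := by
  have hfold : lst.foldl (fun (st : List (Int × Int) × List Int) ele =>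
      if (ele, (PySem.List.count lst ele : Int)) ∈ st.1 then st
      else (st.1 ++ [(ele, (PySem.List.count lst ele : Int))],
            st.2 ++ [(PySem.List.count lst ele : Int)])) ([], [])
      = (pvPairs lst, pvCs lst) := by
    have h := pv_fold_A lst lst []
    simp only [List.map_nil] at h
    rw [h, pvPairs, pvCs, pvPairs, PySem.Set.ofList_eq_foldl]
    simp [List.map_map, Function.comp]
  have hlenCs : (pvCs lst).length = (pvPairs lst).length := by
    simp [pvCs]
  have hiff := pv_accept_iff lst
  unfold check_4_card_helper pvCanon
  rw [hfold]
  simp only [PySem.List.count_eq]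
  by_cases hc : pvCond lst
  · obtain ⟨c1, c2, c3, c4, c5⟩ := hiff.mp hc
    rw [if_neg c1, if_neg (by omega), if_neg (by omega), if_neg (by omega), if_neg (by omega),
        if_pos hc, pv_final_eq]
  · rw [if_neg hc]
    split_ifs with h1 h2 h3 h4 h5 <;> try rfl
    exact absurd (hiff.mpr ⟨h1, by omega, by omega, by omega, by omega⟩) hc

-- ---------- B side: the sorted positional scan also equals pvCanon ----------

-- the scan's loop condition (exactly the port's if-condition, as a named Prop)
abbrev pvPC (s : List Int) (n i : Nat) : Prop :=
  PySem.List.pyGetD s (i : Int) 0 = PySem.List.pyGetD s ((i : Int) + 3) 0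
  ∧ (i = 0 ∨ PySem.List.pyGetD s ((i : Int) - 1) 0 ≠ PySem.List.pyGetD s (i : Int) 0)
  ∧ (i + 4 = n ∨ PySem.List.pyGetD s ((i : Int) + 4) 0 ≠ PySem.List.pyGetD s (i : Int) 0)


-- the pyGetD condition in Nat-index getD form
theorem pv_PC_iff (s : List Int) (n i : Nat) :
    pvPC s n i ↔ (s.getD i 0 = s.getD (i+3) 0 ∧ (i = 0 ∨ s.getD (i-1) 0 ≠ s.getD i 0) ∧
      (i + 4 = n ∨ s.getD (i+4) 0 ≠ s.getD i 0)) := by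
  unfold pvPC
  have h3 : ((i : Int) + 3) = ((i + 3 : Nat) : Int) := by push_cast; ring
  have h4 : ((i : Int) + 4) = ((i + 4 : Nat) : Int) := by push_cast; ring
  rw [h3, h4, PySem.List.pyGetD_natCast, PySem.List.pyGetD_natCast, PySem.List.pyGetD_natCast]
  by_cases h0 : i = 0
  · subst h0; simp
  · have h1 : ((i : Int) - 1) = ((i - 1 : Nat) : Int) := by omega
    rw [h1, PySem.List.pyGetD_natCast]

-- sorted access is monotone in the index
theorem pv_getD_mono (s : List Int) (hs : s.Pairwise (· ≤ ·)) {i j : Nat}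
    (hij : i ≤ j) (hj : j < s.length) : s.getD i 0 ≤ s.getD j 0 := by
  rcases eq_or_lt_of_le hij with rfl | hlt
  · exact le_refl _
  · rw [List.getD_eq_getElem s 0 (by omega), List.getD_eq_getElem s 0 hj]
    exact List.pairwise_iff_getElem.mp hs i j (by omega) hj hlt

-- an exact run of four at i in a sorted list means its value occurs exactly 4 times
theorem pv_Q_count (s : List Int) (hs : s.Pairwise (· ≤ ·)) (i : Nat) (h3 : i + 3 < s.length)
    (h03 : s.getD i 0 = s.getD (i+3) 0)
    (hL : i = 0 ∨ s.getD (i-1) 0 ≠ s.getD i 0)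
    (hR : i + 4 = s.length ∨ s.getD (i+4) 0 ≠ s.getD i 0) :
    s.count (s.getD i 0) = 4 := by
  set v := s.getD i 0 with hv
  have hsand : ∀ k, i ≤ k → k ≤ i + 3 → s.getD k 0 = v := by
    intro k hk1 hk2
    have h1 : v ≤ s.getD k 0 := pv_getD_mono s hs hk1 (by omega)
    have h2 : s.getD k 0 ≤ s.getD (i+3) 0 := pv_getD_mono s hs hk2 (by omega)
    rw [← h03] at h2
    omega
  have h34 : i + 3 + 1 = i + 4 := by omega
  have hdrop : s.drop i = v :: v :: v :: v :: s.drop (i+4) := by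
    rw [List.drop_eq_getElem_cons (by omega : i < s.length),
        List.drop_eq_getElem_cons (by omega : i + 1 < s.length),
        List.drop_eq_getElem_cons (by omega : i + 2 < s.length),
        List.drop_eq_getElem_cons (by omega : i + 3 < s.length), h34]
    have e0 : s[i] = v := by rw [hv, List.getD_eq_getElem s 0 (by omega)]
    have e1 : s[i+1] = v := by
      rw [← hsand (i+1) (by omega) (by omega), List.getD_eq_getElem s 0 (by omega)]
    have e2 : s[i+2] = v := by
      rw [← hsand (i+2) (by omega) (by omega), List.getD_eq_getElem s 0 (by omega)]
    have e3 : s[i+3] = v := by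
      rw [← hsand (i+3) (by omega) (by omega), List.getD_eq_getElem s 0 (by omega)]
    rw [e0, e1, e2, e3]
  have hcnt : s.count v = (s.take i).count v + (s.drop i).count v := by
    conv_lhs => rw [← List.take_append_drop i s]
    rw [List.count_append]
  have htake : (s.take i).count v = 0 := by
    rw [List.count_eq_zero]
    intro hm
    obtain ⟨k, hk, hkv⟩ := List.mem_iff_getElem.mp hm
    have hlen' : (s.take i).length = min i s.length := List.length_take
    have hki : k < i := by omega
    have hks : k < s.length := by omega
    rcases hL with h0 | hne
    · omega
    · have hkv' : s.getD k 0 = v := by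
        rw [List.getD_eq_getElem s 0 hks, ← hkv, List.getElem_take]
      have h1 : s.getD k 0 ≤ s.getD (i-1) 0 := pv_getD_mono s hs (by omega) (by omega)
      have h2 : s.getD (i-1) 0 ≤ v := pv_getD_mono s hs (by omega) (by omega)
      have heq : s.getD (i-1) 0 = v := by omega
      exact hne (heq.trans hv)
  have hdrop4 : (s.drop (i+4)).count v = 0 := by
    rw [List.count_eq_zero]
    intro hm
    obtain ⟨k, hk, hkv⟩ := List.mem_iff_getElem.mp hm
    have hlend : (s.drop (i+4)).length = s.length - (i+4) := List.length_drop
    rcases hR with h0 | hne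
    · omega
    · have hi4 : i + 4 < s.length := by omega
      have hkv' : s.getD (i+4+k) 0 = v := by
        rw [List.getD_eq_getElem s 0 (by omega), ← hkv, List.getElem_drop]
      have h1 : s.getD (i+4) 0 ≤ s.getD (i+4+k) 0 := pv_getD_mono s hs (by omega) (by omega)
      have h2 : v ≤ s.getD (i+4) 0 := pv_getD_mono s hs (by omega) (by omega)
      have heq : s.getD (i+4) 0 = v := by omega
      exact hne (heq.trans hv)
  rw [hcnt, htake, hdrop]
  simp [hdrop4]

-- a sorted list that is bounded below by v starts with count-of-v copies of v
theorem pv_run_split (t : List Int) (v : Int) (ht : t.Pairwise (· ≤ ·))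
    (hall : ∀ x ∈ t, v ≤ x) :
    t = List.replicate (t.count v) v ++ t.drop (t.count v) ∧
      ∀ x ∈ t.drop (t.count v), v < x := by
  induction t with
  | nil => simp
  | cons x t ih =>
    by_cases hx : x = v
    · subst hx
      rw [List.count_cons_self, List.drop_succ_cons, List.replicate_succ]
      have hpt : t.Pairwise (· ≤ ·) := (List.pairwise_cons.mp ht).2
      obtain ⟨ih1, ih2⟩ := ih hpt (fun y hy => hall y (List.mem_cons_of_mem _ hy))
      refine ⟨?_, ih2⟩
      rw [List.cons_append]
      exact congrArg (List.cons _) ih1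
    · have hlt : v < x := lt_of_le_of_ne (hall x List.mem_cons_self) (fun h => hx h.symm)
      have ht' : ∀ y ∈ t, x ≤ y := (List.pairwise_cons.mp ht).1
      have hc0 : (x :: t).count v = 0 := by
        rw [List.count_eq_zero]
        intro hm
        rcases List.mem_cons.mp hm with rfl | hm'
        · omega
        · have := ht' v hm'; omega
      rw [hc0]
      refine ⟨by simp, ?_⟩
      intro y hy
      simp only [List.drop_zero] at hy
      rcases List.mem_cons.mp hy with rfl | hy'
      · exact hlt
      · exact lt_of_lt_of_le hlt (ht' y hy')

-- a sorted list with v occurring exactly 4 times splits as w ++ [v,v,v,v] ++ u, w < v < u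
theorem pv_decomp (s : List Int) (v : Int) (hs : s.Pairwise (· ≤ ·)) (hv : v ∈ s)
    (hc : s.count v = 4) :
    ∃ w u, s = w ++ [v,v,v,v] ++ u ∧ (∀ x ∈ w, x < v) ∧ (∀ x ∈ u, v < x) ∧
      w.Pairwise (· ≤ ·) ∧ u.Pairwise (· ≤ ·) := by
  set p : Int → Bool := fun x => x != v with hp
  set w := s.takeWhile p with hwdef
  set d := s.dropWhile p with hddef
  have hsplit : w ++ d = s := List.takeWhile_append_dropWhile
  have hw_ne : ∀ x ∈ w, x ≠ v := by
    intro x hx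
    have := List.mem_takeWhile_imp hx
    simpa [hp] using this
  have hd_ne : d ≠ [] := by
    intro h0
    rw [h0, List.append_nil] at hsplit
    exact hw_ne v (hsplit ▸ hv) rfl
  obtain ⟨x0, d', hd⟩ := List.exists_cons_of_ne_nil hd_ne
  have hx0 : x0 = v := by
    have h := List.head?_dropWhile_not p s
    rw [← hddef, hd] at h
    simpa [hp] using h
  have hpw : w.Pairwise (· ≤ ·) ∧ d.Pairwise (· ≤ ·) ∧ ∀ a ∈ w, ∀ b ∈ d, a ≤ b := by
    have := hsplit ▸ hs
    exact ⟨(List.pairwise_append.mp this).1, (List.pairwise_append.mp this).2.1,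
      (List.pairwise_append.mp this).2.2⟩
  have hw_lt : ∀ x ∈ w, x < v := by
    intro x hx
    have hle : x ≤ x0 := hpw.2.2 x hx x0 (by rw [hd]; exact List.mem_cons_self)
    rw [hx0] at hle
    exact lt_of_le_of_ne hle (hw_ne x hx)
  have hd_ge : ∀ x ∈ d, v ≤ x := by
    intro x hx
    rw [hd] at hx
    rcases List.mem_cons.mp hx with rfl | hx'
    · omega
    · have := (List.pairwise_cons.mp (hd ▸ hpw.2.1)).1 x hx'
      rw [hx0] at this
      omega
  have hcd : d.count v = 4 := by
    have : s.count v = w.count v + d.count v := by rw [← hsplit, List.count_append]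
    have hw0 : w.count v = 0 := List.count_eq_zero.mpr (fun hm => hw_ne v hm rfl)
    omega
  obtain ⟨hdsplit, hdrop⟩ := pv_run_split d v hpw.2.1 hd_ge
  rw [hcd] at hdsplit hdrop
  refine ⟨w, d.drop 4, ?_, hw_lt, hdrop, hpw.1,
    hpw.2.1.sublist (List.drop_sublist 4 d)⟩
  rw [← hsplit]
  conv_lhs => rw [hdsplit]
  rw [show List.replicate 4 v = [v,v,v,v] from rfl, ← List.append_assoc]

-- Set.add over a fold ignores a disjoint prefix of the accumulator
theorem pv_foldl_add_append (ys acc b : List Int) (h : ∀ z ∈ ys, z ∉ acc) :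
    List.foldl PySem.Set.add (acc ++ b) ys = acc ++ List.foldl PySem.Set.add b ys := by
  induction ys generalizing b with
  | nil => simp
  | cons y ys ih =>
    simp only [List.foldl_cons]
    have hy : y ∉ acc := h y List.mem_cons_self
    have hstep : PySem.Set.add (acc ++ b) y = acc ++ PySem.Set.add b y := by
      rw [PySem.Set.add_eq_ite, PySem.Set.add_eq_ite]
      by_cases hb : y ∈ b
      · rw [if_pos (List.mem_append.mpr (Or.inr hb)), if_pos hb]
      · rw [if_neg (by simp [List.mem_append, hy, hb]), if_neg hb, List.append_assoc]
    rw [hstep, ih _ (fun z hz => h z (List.mem_cons_of_mem _ hz))]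

-- set(xs ++ ys) of value-disjoint parts is the two sets side by side
theorem pv_ofList_append (xs ys : List Int) (h : ∀ z ∈ ys, z ∉ xs) :
    PySem.Set.ofList (xs ++ ys) = PySem.Set.ofList xs ++ PySem.Set.ofList ys := by
  rw [PySem.Set.ofList_eq_foldl, List.foldl_append, ← PySem.Set.ofList_eq_foldl]
  have h2 : ∀ z ∈ ys, z ∉ PySem.Set.ofList xs := by
    intro z hz hzm
    exact h z hz ((PySem.Set.mem_ofList _ _).mp hzm)
  calc List.foldl PySem.Set.add (PySem.Set.ofList xs) ys
      = List.foldl PySem.Set.add (PySem.Set.ofList xs ++ []) ys := by rw [List.append_nil]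
    _ = PySem.Set.ofList xs ++ List.foldl PySem.Set.add [] ys := pv_foldl_add_append ys _ [] h2
    _ = PySem.Set.ofList xs ++ PySem.Set.ofList ys := by rw [← PySem.Set.ofList_eq_foldl]

theorem pv_ofList_replicate (k : Nat) (a : Int) (hk : 0 < k) :
    PySem.Set.ofList (List.replicate k a) = [a] := by
  have haux : ∀ m, List.foldl PySem.Set.add [a] (List.replicate m a) = [a] := by
    intro m
    induction m with
    | zero => rfl
    | succ m ih =>
      rw [List.replicate_succ, List.foldl_cons, PySem.Set.add_eq_ite, if_pos (by simp)]
      exact ih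
  obtain ⟨k, rfl⟩ : ∃ m, k = m + 1 := ⟨k - 1, by omega⟩
  rw [PySem.Set.ofList_eq_foldl, List.replicate_succ, List.foldl_cons]
  have h0 : PySem.Set.add ([] : List Int) a = [a] := by
    rw [PySem.Set.add_eq_ite, if_neg (by simp)]
    rfl
  rw [h0]
  exact haux k

-- pvCs, written directly over set(lst)
theorem pv_cs_eq (lst : List Int) :
    pvCs lst = (PySem.Set.ofList lst).map (fun k => (lst.count k : Int)) := by
  unfold pvCs pvPairs
  simp [List.map_map, Function.comp, PySem.List.count_eq]

-- count signatures of value-disjoint parts concatenate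
theorem pv_cs_append (x y : List Int) (h : ∀ a ∈ x, ∀ b ∈ y, a ≠ b) :
    pvCs (x ++ y) = pvCs x ++ pvCs y := by
  rw [pv_cs_eq, pv_cs_eq, pv_cs_eq,
      pv_ofList_append x y (fun z hz hzx => h z hzx z hz rfl), List.map_append]
  congr 1
  · apply List.map_congr_left
    intro k hk
    have hkx : k ∈ x := (PySem.Set.mem_ofList _ _).mp hk
    have hky : y.count k = 0 := List.count_eq_zero.mpr (fun hm => h k hkx k hm rfl)
    rw [List.count_append, hky]
    simp
  · apply List.map_congr_left
    intro k hk
    have hky : k ∈ y := (PySem.Set.mem_ofList _ _).mp hk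
    have hkx : x.count k = 0 := List.count_eq_zero.mpr (fun hm => h k hm k hky rfl)
    rw [List.count_append, hkx]
    simp

-- a leading run of k copies of a contributes one entry k to the count signature
theorem pv_cs_run (a : Int) (k : Nat) (hk : 0 < k) (rest : List Int) (h : a ∉ rest) :
    pvCs (List.replicate k a ++ rest) = (k : Int) :: pvCs rest := by
  have hd : ∀ b ∈ List.replicate k a, ∀ c ∈ rest, b ≠ c := by
    intro b hb c hc
    rw [List.eq_of_mem_replicate hb]
    exact fun hac => h (hac ▸ hc)
  rw [pv_cs_append _ _ hd]
  have h1 : pvCs (List.replicate k a) = [(k : Int)] := by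
    rw [pv_cs_eq, pv_ofList_replicate k a hk]
    simp
  rw [h1]
  rfl

theorem pv_cs_single (a : Int) : pvCs [a] = [1] := by
  have := pv_cs_run a 1 one_pos [] (List.not_mem_nil)
  simpa using this

theorem pv_cs_pair_eq (a : Int) : pvCs [a, a] = [2] := by
  have := pv_cs_run a 2 (by omega) [] (List.not_mem_nil)
  simpa using this

theorem pv_cs_pair_ne (a b : Int) (h : a ≠ b) : pvCs [a, b] = [1, 1] := by
  have := pv_cs_run a 1 one_pos [b] (by simp [h])
  rw [pv_cs_single] at this
  simpa using this

-- any two cards have count signature {2} or {1,1}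
theorem pv_pairs2 (r : List Int) (hlen : r.length = 2) :
    (pvCs r).Perm [2] ∨ (pvCs r).Perm [1, 1] := by
  match r, hlen with
  | [a, b], _ =>
    by_cases hab : a = b
    · subst hab
      rw [pv_cs_pair_eq]
      exact Or.inl (List.Perm.refl _)
    · rw [pv_cs_pair_ne a b hab]
      exact Or.inr (List.Perm.refl _)

-- four sorted cards have signature {4} or {2,2} exactly when they form two adjacent pairs
theorem pv_pairs4 (r : List Int) (hr : r.Pairwise (· ≤ ·)) (hlen : r.length = 4) :
    ((pvCs r).Perm [4] ∨ (pvCs r).Perm [2, 2]) ↔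
      (r.getD 0 0 = r.getD 1 0 ∧ r.getD 2 0 = r.getD 3 0) := by
  match r, hr, hlen with
  | [a, b, c, d], hr, _ =>
    have hle : a ≤ b ∧ a ≤ c ∧ a ≤ d ∧ b ≤ c ∧ b ≤ d ∧ c ≤ d := by
      simp only [List.pairwise_cons, List.mem_cons, List.not_mem_nil, or_false] at hr
      refine ⟨hr.1 b (by tauto), hr.1 c (by tauto), hr.1 d (by tauto),
        hr.2.1 c (by tauto), hr.2.1 d (by tauto), hr.2.2.1 d (by tauto)⟩
    obtain ⟨hab, hac, had, hbc, hbd, hcd⟩ := hle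
    simp only [List.getD_cons_zero, List.getD_cons_succ]
    by_cases h1 : a = b
    · subst h1
      by_cases h2 : a = c
      · subst h2
        by_cases h3 : a = d
        · subst h3
          have hcs : pvCs [a, a, a, a] = [4] := by
            have := pv_cs_run a 4 (by omega) [] (List.not_mem_nil)
            simpa using this
          rw [hcs]
          exact ⟨fun _ => ⟨rfl, rfl⟩, fun _ => Or.inl (List.Perm.refl _)⟩
        · have hcs : pvCs [a, a, a, d] = [3, 1] := by
            have := pv_cs_run a 3 (by omega) [d] (by simp [h3])
            rw [pv_cs_single] at this
            simpa using this
          rw [hcs]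
          constructor
          · rintro (hp | hp)
            · exact absurd hp (by decide)
            · exact absurd hp (by decide)
          · rintro ⟨-, h⟩
            exact absurd h h3
      · by_cases h3 : c = d
        · subst h3
          have hcs : pvCs [a, a, c, c] = [2, 2] := by
            have := pv_cs_run a 2 (by omega) [c, c] (by simp [h2])
            rw [pv_cs_pair_eq] at this
            simpa using this
          rw [hcs]
          exact ⟨fun _ => ⟨rfl, rfl⟩, fun _ => Or.inr (List.Perm.refl _)⟩
        · have hcs : pvCs [a, a, c, d] = [2, 1, 1] := by
            have := pv_cs_run a 2 (by omega) [c, d]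
              (by simp only [List.mem_cons, List.not_mem_nil, or_false]; omega)
            rw [pv_cs_pair_ne c d h3] at this
            simpa using this
          rw [hcs]
          constructor
          · rintro (hp | hp)
            · exact absurd hp (by decide)
            · exact absurd hp (by decide)
          · rintro ⟨-, h⟩
            exact absurd h h3
    · have hcs : pvCs [a, b, c, d] = 1 :: pvCs [b, c, d] := by
        have := pv_cs_run a 1 one_pos [b, c, d]
          (by simp only [List.mem_cons, List.not_mem_nil, or_false]; omega)
        simpa using this
      rw [hcs]
      constructor
      · rintro (hp | hp)
        · have := hp.mem_iff.mp List.mem_cons_self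
          simp at this
        · have := hp.mem_iff.mp List.mem_cons_self
          simp at this
      · rintro ⟨h', -⟩
        exact absurd h' h1

-- min with identity key is permutation-invariant
theorem pv_min?_id_perm (l1 l2 : List Int) (h : l1.Perm l2) :
    PySem.List.min? l1 (fun x => x) = PySem.List.min? l2 (fun x => x) := by
  cases hn1 : PySem.List.min? l1 (fun x => x) with
  | none =>
    have hl1 : l1 = [] := (PySem.List.min?_eq_none_iff _ _).mp hn1
    have hl2 : l2 = [] := (hl1 ▸ h).symm.eq_nil
    rw [hl2]
    rfl
  | some m1 =>
    cases hn2 : PySem.List.min? l2 (fun x => x) with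
    | none =>
      have hl2 : l2 = [] := (PySem.List.min?_eq_none_iff _ _).mp hn2
      have hl1 : l1 = [] := (hl2 ▸ h).eq_nil
      rw [hl1] at hn1
      simp [PySem.List.min?] at hn1
    | some m2 =>
      have hm1 : m1 ∈ l2 := h.mem_iff.mp (PySem.List.min?_mem hn1)
      have hm2 : m2 ∈ l1 := h.mem_iff.mpr (PySem.List.min?_mem hn2)
      have h12 : m1 ≤ m2 := PySem.List.min?_isMin hn1 m2 hm2
      have h21 : m2 ≤ m1 := PySem.List.min?_isMin hn2 m1 hm1
      rw [le_antisymm h12 h21]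

-- the quad list of pvCanon, characterised
theorem pv_mem_quads (s : List Int) (y : Int) :
    y ∈ ((pvPairs s).filter (fun p => p.2 = 4)).map (fun p => p.1) ↔
      y ∈ s ∧ s.count y = 4 := by
  constructor
  · intro hm
    obtain ⟨p, hp, hpy⟩ := List.mem_map.mp hm
    obtain ⟨hpp, hp4⟩ := List.mem_filter.mp hp
    obtain ⟨k, hk, hkp⟩ := List.mem_map.mp hpp
    rw [← hkp] at hpy hp4
    simp only [decide_eq_true_eq] at hp4
    refine ⟨?_, ?_⟩
    · rw [← hpy]
      exact (PySem.Set.mem_ofList _ _).mp hk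
    · rw [PySem.List.count_eq] at hp4
      rw [← hpy]
      exact_mod_cast hp4
  · rintro ⟨hys, hyc⟩
    refine List.mem_map.mpr ⟨(y, (PySem.List.count s y : Int)), List.mem_filter.mpr ⟨?_, ?_⟩, rfl⟩
    · exact List.mem_map.mpr ⟨y, (PySem.Set.mem_ofList _ _).mpr hys, rfl⟩
    · simp [PySem.List.count_eq, hyc]

-- a legal play always contains a rank held exactly four times
theorem pv_cond_quad (s : List Int) (h : pvCond s) : ∃ v, v ∈ s ∧ s.count v = 4 := by
  have h4 : (4 : Int) ∈ pvCs s := by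
    rcases h with ⟨-, hp | hp⟩ | ⟨-, hp | hp⟩ <;> exact hp.mem_iff.mpr (by decide)
  rw [pv_cs_eq] at h4
  obtain ⟨k, hk, hk4⟩ := List.mem_map.mp h4
  exact ⟨k, (PySem.Set.mem_ofList _ _).mp hk, by exact_mod_cast hk4⟩

-- pvCanon is permutation-invariant
theorem pv_canon_perm (l1 l2 : List Int) (h : l1.Perm l2) : pvCanon l1 = pvCanon l2 := by
  have hof : (PySem.Set.ofList l1).Perm (PySem.Set.ofList l2) := by
    rw [List.perm_ext_iff_of_nodup (PySem.Set.nodup_ofList _) (PySem.Set.nodup_ofList _)]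
    intro a
    rw [PySem.Set.mem_ofList, PySem.Set.mem_ofList]
    exact h.mem_iff
  have hfun : (fun k => (k, (PySem.List.count l1 k : Int)))
      = (fun k => (k, (PySem.List.count l2 k : Int))) := by
    funext k
    simp [PySem.List.count_eq, h.count_eq]
  have hpp : (pvPairs l1).Perm (pvPairs l2) := by
    unfold pvPairs
    rw [hfun]
    exact hof.map _
  have hcs : (pvCs l1).Perm (pvCs l2) := hpp.map _
  have hsig : ∀ sig : List Int, ((pvCs l1).Perm sig ↔ (pvCs l2).Perm sig) :=
    fun sig => ⟨fun q => hcs.symm.trans q, fun q => hcs.trans q⟩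
  have hcond : pvCond l1 ↔ pvCond l2 := by
    unfold pvCond
    rw [h.length_eq, hsig, hsig, hsig, hsig]
  unfold pvCanon
  by_cases hc : pvCond l1
  · rw [if_pos hc, if_pos (hcond.mp hc)]
    exact pv_min?_id_perm _ _ ((hpp.filter _).map _)
  · rw [if_neg hc, if_neg (fun hx => hc (hcond.mpr hx))]

-- one unfolding step of the scan, with the loop condition named
theorem pv_scan_succ (s : List Int) (n fuel i : Nat) :
    check_4_card_scan s n (fuel + 1) i =
      if pvPC s n i then
        (if n = 8 then
          (let r := PySem.List.slice s none (some (i : Int)) ++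
              PySem.List.slice s (some ((i : Int) + 4)) none
           if PySem.List.pyGetD r 0 0 ≠ PySem.List.pyGetD r 1 0 ∨
              PySem.List.pyGetD r 2 0 ≠ PySem.List.pyGetD r 3 0 then none
           else some (PySem.List.pyGetD s (i : Int) 0))
        else some (PySem.List.pyGetD s (i : Int) 0))
      else check_4_card_scan s n fuel (i + 1) := rfl

-- the scan skips indices whose condition fails
theorem pv_scan_skip (s : List Int) (n : Nat) (m : Nat) :
    ∀ (fuel j : Nat), (∀ k, j ≤ k → k < j + m → ¬ pvPC s n k) →
      check_4_card_scan s n (fuel + m) j = check_4_card_scan s n fuel (j + m) := by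
  induction m with
  | zero => intro fuel j _; rfl
  | succ m ih =>
    intro fuel j h
    have h1 : fuel + (m + 1) = (fuel + m) + 1 := by omega
    rw [h1, pv_scan_succ, if_neg (h j le_rfl (by omega))]
    have h2 : j + (m + 1) = (j + 1) + m := by omega
    rw [h2]
    exact ih fuel (j + 1) (fun k hk1 hk2 => h k (by omega) (by omega))

-- the scan returns none when no scanned index satisfies the condition
theorem pv_scan_none (s : List Int) (n : Nat) :
    ∀ fuel i, (∀ k, i ≤ k → k < i + fuel → ¬ pvPC s n k) →
      check_4_card_scan s n fuel i = none := by
  intro fuel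
  induction fuel with
  | zero => intro i _; rfl
  | succ fuel ih =>
    intro i h
    rw [pv_scan_succ, if_neg (h i le_rfl (by omega))]
    exact ih (i + 1) (fun k hk1 hk2 => h k (by omega) (by omega))

-- the core equivalence on the sorted hand
theorem pv_scan_canon (s : List Int) (hs : s.Pairwise (· ≤ ·))
    (h68 : s.length = 6 ∨ s.length = 8) :
    check_4_card_scan s s.length (s.length - 3) 0 = pvCanon s := by
  by_cases hq : ∃ v, v ∈ s ∧ s.count v = 4
  case neg =>
    have hcanon : pvCanon s = none := by
      unfold pvCanon
      rw [if_neg (fun hc => hq (pv_cond_quad s hc))]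
    rw [hcanon]
    apply pv_scan_none
    intro k hk0 hk hpc
    obtain ⟨h03, hL, hR⟩ := (pv_PC_iff s s.length k).mp hpc
    have hcnt := pv_Q_count s hs k (by omega) h03 hL hR
    have hmem : s.getD k 0 ∈ s := by
      rw [List.getD_eq_getElem s 0 (by omega)]
      exact List.getElem_mem _
    exact hq ⟨s.getD k 0, hmem, hcnt⟩
  case pos =>
    -- v := the smallest rank held four times, straight from pvCanon's own min
    obtain ⟨v0, hv0s, hv0c⟩ := hq
    have hv0q := (pv_mem_quads s v0).mpr ⟨hv0s, hv0c⟩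
    obtain ⟨v, hvmin⟩ : ∃ v, PySem.List.min?
        (((pvPairs s).filter (fun p => p.2 = 4)).map (fun p => p.1)) (fun x => x) = some v := by
      cases hmin : PySem.List.min?
          (((pvPairs s).filter (fun p => p.2 = 4)).map (fun p => p.1)) (fun x => x) with
      | none =>
        have := (PySem.List.min?_eq_none_iff _ _).mp hmin
        rw [this] at hv0q
        exact absurd hv0q (List.not_mem_nil)
      | some m => exact ⟨m, rfl⟩
    obtain ⟨hvs, hvc⟩ := (pv_mem_quads s v).mp (PySem.List.min?_mem hvmin)
    have hvle : ∀ y, y ∈ s → s.count y = 4 → v ≤ y := by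
      intro y hys hyc
      exact PySem.List.min?_isMin hvmin y ((pv_mem_quads s y).mpr ⟨hys, hyc⟩)
    obtain ⟨w, u, hsplit, hwlt, hugt, hwp, hup⟩ := pv_decomp s v hs hvs hvc
    have hlen : s.length = w.length + 4 + u.length := by
      rw [hsplit]
      simp
      omega
    -- getD values of s through the decomposition
    have hmid : ∀ k, k < 4 → s.getD (w.length + k) 0 = v := by
      intro k hk
      rw [hsplit, List.append_assoc, List.getD_append_right _ _ _ _ (by omega),
          show w.length + k - w.length = k by omega]
      interval_cases k <;> rfl
    have hbefore : ∀ j, j < w.length → s.getD j 0 = w.getD j 0 := by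
      intro j hj
      rw [hsplit, List.append_assoc, List.getD_append _ _ _ _ hj]
    have hafter : ∀ k, s.getD (w.length + 4 + k) 0 = u.getD k 0 := by
      intro k
      rw [hsplit, List.getD_append_right _ _ _ _ (by simp)]
      congr 1
      simp only [List.length_append, List.length_cons, List.length_nil]
      omega
    have hwmem : ∀ j, j < w.length → w.getD j 0 ∈ w := by
      intro j hj
      rw [List.getD_eq_getElem w 0 hj]
      exact List.getElem_mem _
    -- no index before w.length satisfies the condition
    have hskip : ∀ k, k < w.length → ¬ pvPC s s.length k := by
      intro k hk hpc
      obtain ⟨h03, hL, hR⟩ := (pv_PC_iff s s.length k).mp hpc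
      have hcnt := pv_Q_count s hs k (by omega) h03 hL hR
      have hmemk : s.getD k 0 ∈ s := by
        rw [List.getD_eq_getElem s 0 (by omega)]
        exact List.getElem_mem _
      have hlt : s.getD k 0 < v := by
        rw [hbefore k hk]
        exact hwlt _ (hwmem k hk)
      have := hvle _ hmemk hcnt
      omega
    -- the condition holds at w.length
    have hQi : pvPC s s.length w.length := by
      rw [pv_PC_iff]
      refine ⟨?_, ?_, ?_⟩
      · rw [show w.length + 3 = w.length + 3 from rfl]
        have h0 := hmid 0 (by omega)
        have h3 := hmid 3 (by omega)
        rw [show w.length + 0 = w.length by omega] at h0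
        rw [h0, h3]
      · by_cases h0 : w.length = 0
        · exact Or.inl h0
        · refine Or.inr ?_
          have hb := hbefore (w.length - 1) (by omega)
          have hv' : s.getD w.length 0 = v := by
            have := hmid 0 (by omega)
            rwa [show w.length + 0 = w.length by omega] at this
          rw [hb, hv']
          have := hwlt _ (hwmem (w.length - 1) (by omega))
          omega
      · by_cases hu0 : u.length = 0
        · exact Or.inl (by omega)
        · refine Or.inr ?_
          have ha := hafter 0
          rw [show w.length + 4 + 0 = w.length + 4 by omega] at ha
          have hv' : s.getD w.length 0 = v := by
            have := hmid 0 (by omega)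
            rwa [show w.length + 0 = w.length by omega] at this
          rw [ha, hv']
          have h0m : u.getD 0 0 ∈ u := by
            rw [List.getD_eq_getElem u 0 (by omega)]
            exact List.getElem_mem _
          have := hugt _ h0m
          omega
    have hwlen : w.length < s.length - 3 := by omega
    -- value at the found index
    have hgv : PySem.List.pyGetD s ((w.length : Nat) : Int) 0 = v := by
      rw [PySem.List.pyGetD_natCast]
      have := hmid 0 (by omega)
      rwa [show w.length + 0 = w.length by omega] at this
    -- the leftover cards r = s[:i] + s[i+4:] are exactly w ++ u
    have hr : PySem.List.slice s none (some ((w.length : Nat) : Int)) ++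
        PySem.List.slice s (some (((w.length : Nat) : Int) + 4)) none = w ++ u := by
      rw [PySem.List.slice_to_natCast,
          show ((w.length : Nat) : Int) + 4 = (((w.length + 4 : Nat)) : Int) by push_cast; ring,
          PySem.List.slice_from_natCast]
      congr 1
      · rw [hsplit, List.append_assoc, List.take_left]
      · rw [hsplit, show w.length + 4 = (w ++ [v,v,v,v]).length by simp, List.drop_left]
    -- w ++ u is sorted
    have hwu : (w ++ u).Pairwise (· ≤ ·) := by
      rw [List.pairwise_append]
      exact ⟨hwp, hup, fun a ha b hb => le_of_lt (lt_trans (hwlt a ha) (hugt b hb))⟩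
    have hwulen : (w ++ u).length = w.length + u.length := by simp
    -- pvCs s via the decomposition
    have hcs : pvCs s = pvCs w ++ ((4 : Int) :: pvCs u) := by
      rw [hsplit, List.append_assoc, pv_cs_append w ([v,v,v,v] ++ u)
          (fun a ha b hb => by
            rcases List.mem_append.mp hb with hb | hb
            · have : b = v := by
                rcases List.mem_cons.mp hb with h | h
                · exact h
                · rcases List.mem_cons.mp h with h | h
                  · exact h
                  · rcases List.mem_cons.mp h with h | h
                    · exact h
                    · simpa using h
              have := hwlt a ha
              omega
            · have := hwlt a ha
              have := hugt b hb
              omega),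
          show ([v,v,v,v] : List Int) = List.replicate 4 v from rfl,
          pv_cs_run v 4 (by omega) u (fun hm => by have := hugt v hm; omega)]
      norm_num
    have hcswu : pvCs (w ++ u) = pvCs w ++ pvCs u :=
      pv_cs_append w u (fun a ha b hb => by
        have := hwlt a ha
        have := hugt b hb
        omega)
    -- pvCs s is 4 :: pvCs (w ++ u) up to permutation
    have hcsperm : (pvCs s).Perm ((4 : Int) :: pvCs (w ++ u)) := by
      rw [hcs, hcswu]
      exact List.perm_middle
    rcases h68 with h6 | h8
    · -- six cards: a quad always makes the play legal
      have hlu : w.length + u.length = 2 := by omega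
      have p42 : ([4, 2] : List Int).Perm [2, 4] := by decide
      have p411 : ([4, 1, 1] : List Int).Perm [1, 1, 4] := by decide
      have hcond : pvCond s := by
        refine Or.inl ⟨h6, ?_⟩
        rcases pv_pairs2 (w ++ u) (by omega) with hp | hp
        · exact Or.inr (hcsperm.trans ((hp.cons 4).trans p42))
        · exact Or.inl (hcsperm.trans ((hp.cons 4).trans p411))
      rw [show s.length - 3 = (s.length - 3 - w.length) + w.length by omega,
          pv_scan_skip s s.length w.length _ 0 (fun k _ hk => hskip k (by omega)),
          Nat.zero_add,
          show s.length - 3 - w.length = (s.length - 4 - w.length) + 1 by omega,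
          pv_scan_succ, if_pos hQi, if_neg (by omega), hgv]
      unfold pvCanon
      rw [if_pos hcond, hvmin]
    · -- eight cards: legal iff the four leftovers are two adjacent pairs
      have hlu : w.length + u.length = 4 := by omega
      have hpass : ((pvCs s).Perm [4, 4] ∨ (pvCs s).Perm [2, 2, 4]) ↔
          ((w ++ u).getD 0 0 = (w ++ u).getD 1 0 ∧ (w ++ u).getD 2 0 = (w ++ u).getD 3 0) := by
        rw [← pv_pairs4 (w ++ u) hwu (by omega)]
        have p224 : ([2, 2, 4] : List Int).Perm [4, 2, 2] := by decide
        have p4224 : ([4, 2, 2] : List Int).Perm [2, 2, 4] := by decide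
        constructor
        · rintro (hp | hp)
          · exact Or.inl ((List.perm_cons 4).mp (hcsperm.symm.trans hp))
          · exact Or.inr ((List.perm_cons 4).mp ((hcsperm.symm.trans hp).trans p224))
        · rintro (hp | hp)
          · exact Or.inl (hcsperm.trans (hp.cons 4))
          · exact Or.inr (hcsperm.trans ((hp.cons 4).trans p4224))
      have hcond : pvCond s ↔
          ((w ++ u).getD 0 0 = (w ++ u).getD 1 0 ∧ (w ++ u).getD 2 0 = (w ++ u).getD 3 0) := by
        unfold pvCond
        rw [← hpass]
        constructor
        · rintro (⟨h', -⟩ | ⟨-, hp⟩)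
          · omega
          · exact hp
        · intro hp
          exact Or.inr ⟨h8, hp⟩
      rw [show s.length - 3 = (s.length - 3 - w.length) + w.length by omega,
          pv_scan_skip s s.length w.length _ 0 (fun k _ hk => hskip k (by omega)),
          Nat.zero_add,
          show s.length - 3 - w.length = (s.length - 4 - w.length) + 1 by omega,
          pv_scan_succ, if_pos hQi, if_pos h8]
      simp only [hr]
      -- r's four entries
      have hrlen : (w ++ u).length = 4 := by omega
      have hg : ∀ k : Nat, k < 4 → PySem.List.pyGetD (w ++ u) (k : Int) 0 = (w ++ u).getD k 0 := by
        intro k _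
        rw [PySem.List.pyGetD_natCast]
      have hg0 := hg 0 (by omega)
      have hg1 := hg 1 (by omega)
      have hg2 := hg 2 (by omega)
      have hg3 := hg 3 (by omega)
      push_cast at hg0 hg1 hg2 hg3
      rw [hg0, hg1, hg2, hg3, hgv]
      by_cases hp : (w ++ u).getD 0 0 = (w ++ u).getD 1 0 ∧ (w ++ u).getD 2 0 = (w ++ u).getD 3 0
      · rw [if_neg (fun hcon => hcon.elim (fun h => h hp.1) (fun h => h hp.2))]
        unfold pvCanon
        rw [if_pos (hcond.mpr hp), hvmin]
      · rw [if_pos (by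
          by_cases h1 : (w ++ u).getD 0 0 = (w ++ u).getD 1 0
          · exact Or.inr (fun h2 => hp ⟨h1, h2⟩)
          · exact Or.inl h1)]
        unfold pvCanon
        rw [if_neg (fun hc => hp (hcond.mp hc))]

theorem pv_quad_eq (lst : List Int) : check_4_card_quad lst = pvCanon lst := by
  unfold check_4_card_quad
  by_cases hL : lst.length ≠ 6 ∧ lst.length ≠ 8
  · rw [if_pos hL]
    unfold pvCanon
    rw [if_neg (by rintro (⟨h, -⟩ | ⟨h, -⟩) <;> omega)]
  · rw [if_neg hL]
    have h68 : lst.length = 6 ∨ lst.length = 8 := by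
      by_cases h : lst.length = 6
      · exact Or.inl h
      · exact Or.inr (by omega)
    have hperm : (PySem.List.sorted lst (fun x => x) false).Perm lst :=
      PySem.List.sorted_perm lst (fun x => x) false
    have hps : (PySem.List.sorted lst (fun x => x) false).Pairwise (· ≤ ·) :=
      PySem.List.sorted_pairwise lst (fun x => x)
    rw [show lst.length = (PySem.List.sorted lst (fun x => x) false).length from hperm.length_eq.symm,
        pv_scan_canon _ hps (by rw [hperm.length_eq]; exact h68)]
    exact pv_canon_perm _ _ hperm

-- ===== VERDICT (by name: the statement is the Claim_ definition above) =====
theorem check_4_card_spec : Claim_equal_check_4_card := by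
  intro curr prev _
  unfold Spec_check_4_card check_4_card check_4_card_alt
  rw [pv_helperA_eq, pv_helperA_eq, pv_quad_eq, pv_quad_eq]
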